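-- pv_equiv track=rewrite | github.com/Himanshu790310/biryaniclub19 | update_pricing.py | rename_portion_sizes
-- ===== SOURCE A (Python) =====
-- def rename_portion_sizes(name):
--     """Rename portion sizes for better psychology"""
--     replacements = [
--         (' (Small)', ' (Half)'),
--         (' (small)', ' (Half)'),
--         (' (Large)', ' (Full)'),
--         (' (large)', ' (Full)'),
--         # Also handle the plain versions without parentheses
--         (' Small', ' (Half)'),
--         (' Large', ' (Full)'),
--     ]
--
--     new_name = name
--     for old, new in replacements:
--         new_name = new_name.replace(old, new)
--
--     return new_name
-- ===== SOURCE B (Python) =====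
-- RENAMES = {
--     ' (Small)': ' (Half)', ' (small)': ' (Half)',
--     ' (Large)': ' (Full)', ' (large)': ' (Full)',
--     ' Small': ' (Half)', ' Large': ' (Full)',
-- }
--
-- def rename_portion_sizes(name):
--     """Rename portion sizes for better psychology (single left-to-right scan)."""
--     out = []
--     i = 0
--     n = len(name)
--     while i < n:
--         for old, new in RENAMES.items():
--             if name.startswith(old, i):
--                 out.append(new)
--                 i += len(old)
--                 break
--         else:
--             out.append(name[i])
--             i += 1
--     return ''.join(out)
-- ===== Notes on version B (the rewrite author's own statement) =====
-- stated objective: alternative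
-- what changed: A makes six sequential full-string str.replace passes; B builds the output in a single left-to-right scan that at each position tries the six (old, new) table entries via startswith and emits the replacement or the current character.
import Mathlib
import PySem

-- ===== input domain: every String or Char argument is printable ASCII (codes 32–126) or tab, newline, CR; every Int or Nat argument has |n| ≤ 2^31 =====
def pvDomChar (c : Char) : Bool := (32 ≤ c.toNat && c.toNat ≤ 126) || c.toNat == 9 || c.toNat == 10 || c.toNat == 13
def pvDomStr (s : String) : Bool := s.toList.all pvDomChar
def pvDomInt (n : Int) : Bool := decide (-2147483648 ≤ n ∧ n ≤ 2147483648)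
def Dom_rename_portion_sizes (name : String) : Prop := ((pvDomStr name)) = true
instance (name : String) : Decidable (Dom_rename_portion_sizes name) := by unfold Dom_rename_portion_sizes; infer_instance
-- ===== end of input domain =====

-- B replaces A's six sequential full-string replace passes by a single left-to-right scan that
-- rewrites each label where it is found (objective: alternative single-pass algorithm, same result).

-- ===== PORT A =====
-- literal transliteration of A: fold the six str.replace calls over the string, in order
def rename_portion_sizes (name : String) : String :=
  let replacements : List (String × String) :=
    [(" (Small)", " (Half)"), (" (small)", " (Half)"),
     (" (Large)", " (Full)"), (" (large)", " (Full)"),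
     (" Small", " (Half)"), (" Large", " (Full)")]
  replacements.foldl (fun new_name p => PySem.Str.replace new_name p.1 p.2) name

-- ===== PORT B =====
-- B's table of (old, new) pairs, as lists of chars
def pvTable : List (List Char × List Char) :=
  [(" (Small)".toList, " (Half)".toList), (" (small)".toList, " (Half)".toList),
   (" (Large)".toList, " (Full)".toList), (" (large)".toList, " (Full)".toList),
   (" Small".toList, " (Half)".toList), (" Large".toList, " (Full)".toList)]

-- B's while loop: at each position try the table entries in order (Python's startswith(old, i));
-- on a hit emit the replacement and advance by len(old), else emit the character and advance by 1.
-- (advancing i by len(old) from position of c :: t = dropping len(old) - 1 from t)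
def pvScan : List Char → List Char
  | [] => []
  | c :: t =>
    match pvTable.findSome? (fun p => if p.1.isPrefixOf (c :: t) then some p else none) with
    | some p => p.2 ++ pvScan (t.drop (p.1.length - 1))
    | none => c :: pvScan t
termination_by l => l.length
decreasing_by
  · simp
  · simp

def rename_portion_sizes_alt (name : String) : String :=
  String.ofList (pvScan name.toList)

-- ===== PRECONDITION & SPEC =====
def Spec_rename_portion_sizes (name : String) (out : String) : Prop := out = rename_portion_sizes_alt name
instance (name : String) (out : String) : Decidable (Spec_rename_portion_sizes name out) := by unfold Spec_rename_portion_sizes; infer_instance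

-- ===== CLAIM (what is proved, stated in full; the proofs are below) =====
def Claim_equal_rename_portion_sizes : Prop := ∀ (name : String), Dom_rename_portion_sizes name → Spec_rename_portion_sizes name (rename_portion_sizes name)

-- ===== LEMMAS AND PROOFS =====

-- fuel-free reformulation of PySem.Chars.replace (one replace pass)
def rep1 (old new : List Char) : List Char → List Char
  | [] => []
  | c :: t => if old.isPrefixOf (c :: t) then new ++ rep1 old new (t.drop (old.length - 1)) else c :: rep1 old new t
termination_by l => l.length
decreasing_by
  · simp
  · simp

theorem go_spec (old new : List Char) (h : old ≠ []) :
    ∀ fuel l acc, l.length ≤ fuel → PySem.Chars.replace.go old new fuel l acc = acc.reverse ++ rep1 old new l := by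
  have hone : 1 ≤ old.length := by
    cases old with
    | nil => exact absurd rfl h
    | cons a b => simp
  intro fuel
  induction fuel using Nat.strong_induction_on with
  | _ fuel ih =>
    intro l acc hl
    match fuel, l with
    | 0, [] => simp [PySem.Chars.replace.go, rep1]
    | 0, c :: t => simp at hl
    | Nat.succ f, [] => simp [PySem.Chars.replace.go, rep1]
    | Nat.succ f, c :: t =>
      rw [PySem.Chars.replace.go]
      have hlf : t.length ≤ f := by simpa using hl
      by_cases hp : old.isPrefixOf (c :: t)
      · have hd : (c :: t).drop old.length = t.drop (old.length - 1) := by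
          match old, h with
          | o :: o', _ => simp
        simp only [hp, if_true]
        rw [hd, ih f (by omega) _ _ (by simp; omega), rep1]
        simp [hp]
      · simp only [hp, Bool.false_eq_true, if_false]
        rw [ih f (by omega) t (c :: acc) hlf, rep1]
        simp [hp]

theorem replace_eq_rep1 (s old new : List Char) (h : old ≠ []) :
    PySem.Chars.replace s old new = rep1 old new s := by
  rw [PySem.Chars.replace.eq_def]
  simp [List.isEmpty_iff, h, go_spec old new h s.length s [] le_rfl]

theorem prefix_take_of_prefix_append {old u x : List Char} (h : old <+: u ++ x) :
    old.take u.length <+: u := by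
  have h2 := h.take u.length
  simpa using h2

theorem rep1_cons_of_not_prefix {old new : List Char} {c : Char} {v : List Char}
    (h : ¬ old <+: (c :: v)) : rep1 old new (c :: v) = c :: rep1 old new v := by
  rw [rep1]
  simp [List.isPrefixOf_iff_prefix, h]

theorem rep1_fire (old new : List Char) (h : old ≠ []) (x : List Char) :
    rep1 old new (old ++ x) = new ++ rep1 old new x := by
  match old, h with
  | o :: o', _ =>
    rw [List.cons_append, rep1]
    have hp : (o :: o').isPrefixOf (o :: (o' ++ x)) = true := by
      rw [List.isPrefixOf_iff_prefix]
      exact List.prefix_append _ _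
    simp [hp]

-- a replace pass walks through a region `pfx` in which its pattern matches nowhere
theorem rep1_append_of_nomatch (old new pfx : List Char)
    (H : ∀ k < pfx.length, ¬ old.take (pfx.length - k) <+: pfx.drop k) (x : List Char) :
    rep1 old new (pfx ++ x) = pfx ++ rep1 old new x := by
  induction pfx with
  | nil => simp
  | cons a p ih =>
    have hnp : ¬ old <+: a :: (p ++ x) := by
      intro hpre
      have h2 := prefix_take_of_prefix_append (u := a :: p) hpre
      exact H 0 (by simp) (by simpa using h2)
    rw [List.cons_append, rep1_cons_of_not_prefix hnp, ih]
    · simp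
    · intro k hk
      have := H (k + 1) (by simp; omega)
      simpa using this

-- a space-free prefix of the output of a replace pass (whose replacement starts with ' ')
-- was already a prefix of the input
theorem rep1_prefix_nospace (old new : List Char) (hnew : ∃ n', new = ' ' :: n') :
    ∀ v w, ' ' ∉ w → w <+: rep1 old new v → w <+: v := by
  have key : ∀ n (v : List Char), v.length ≤ n → ∀ w, ' ' ∉ w → w <+: rep1 old new v → w <+: v := by
    intro n
    induction n with
    | zero =>
      intro v hv w hw hpre
      match v, hv with
      | [], _ => simpa [rep1] using hpre
    | succ n ih =>
      intro v hv w hw hpre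
      match v with
      | [] => simpa [rep1] using hpre
      | c :: t =>
        rw [rep1] at hpre
        by_cases hp : old.isPrefixOf (c :: t)
        · simp only [hp, if_true] at hpre
          obtain ⟨n', rfl⟩ := hnew
          match w with
          | [] => exact List.nil_prefix
          | a :: w' =>
            rw [List.cons_append, List.cons_prefix_cons] at hpre
            exact absurd hpre.1 (by intro h; rw [h] at hw; simp at hw)
        · simp only [hp, Bool.false_eq_true, if_false] at hpre
          match w with
          | [] => exact List.nil_prefix
          | a :: w' =>
            rw [List.cons_prefix_cons] at hpre
            rw [List.cons_prefix_cons]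
            refine ⟨hpre.1, ih t (by simpa using hv) w' (by simp at hw; exact hw.2) hpre.2⟩
  exact fun v => key v.length v le_rfl

-- A's chain of replace passes, as a fold over the same table
def pvStep (acc : List Char) (pr : List Char × List Char) : List Char := rep1 pr.1 pr.2 acc
def pvChain (s : List Char) : List Char := pvTable.foldl pvStep s

-- shape of every table entry: pattern = ' ' :: (space-free), replacement starts with ' '
def pvShape (L : List (List Char × List Char)) : Prop :=
  ∀ pr ∈ L, (∃ w, pr.1 = ' ' :: w ∧ ' ' ∉ w) ∧ (∃ n', pr.2 = ' ' :: n')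

theorem pvTable_shape : pvShape pvTable := by
  intro pr hpr
  simp only [pvTable, List.mem_cons, List.not_mem_nil, or_false] at hpr
  rcases hpr with rfl | rfl | rfl | rfl | rfl | rfl
  · exact ⟨⟨"(Small)".toList, by decide, by decide⟩, "(Half)".toList, by decide⟩
  · exact ⟨⟨"(small)".toList, by decide, by decide⟩, "(Half)".toList, by decide⟩
  · exact ⟨⟨"(Large)".toList, by decide, by decide⟩, "(Full)".toList, by decide⟩
  · exact ⟨⟨"(large)".toList, by decide, by decide⟩, "(Full)".toList, by decide⟩
  · exact ⟨⟨"Small".toList, by decide, by decide⟩, "(Half)".toList, by decide⟩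
  · exact ⟨⟨"Large".toList, by decide, by decide⟩, "(Full)".toList, by decide⟩

theorem chain_cons_nomatch :
    ∀ (L : List (List Char × List Char)) (c : Char) (v : List Char),
      pvShape L → (∀ pr ∈ L, ¬ pr.1 <+: (c :: v)) →
      L.foldl pvStep (c :: v) = c :: L.foldl pvStep v := by
  intro L
  induction L with
  | nil => intro c v _ _; rfl
  | cons pr L' ih =>
    intro c v hL hnm
    have h0 : ¬ pr.1 <+: (c :: v) := hnm pr List.mem_cons_self
    rw [List.foldl_cons, List.foldl_cons]
    show List.foldl pvStep (rep1 pr.1 pr.2 (c :: v)) L' = c :: List.foldl pvStep (rep1 pr.1 pr.2 v) L'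
    rw [rep1_cons_of_not_prefix h0]
    refine ih c (rep1 pr.1 pr.2 v) (fun q hq => hL q (List.mem_cons_of_mem _ hq)) ?_
    intro q hq hpre
    obtain ⟨⟨w, hw1, hw2⟩, _⟩ := hL q (List.mem_cons_of_mem _ hq)
    rw [hw1, List.cons_prefix_cons] at hpre
    have hwv : w <+: v :=
      rep1_prefix_nospace pr.1 pr.2 (hL pr List.mem_cons_self).2 v w hw2 hpre.2
    exact hnm q (List.mem_cons_of_mem _ hq) (by rw [hw1, List.cons_prefix_cons]; exact ⟨hpre.1, hwv⟩)

theorem scan_cons_nomatch (c : Char) (v : List Char)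
    (hnm : ∀ pr ∈ pvTable, ¬ pr.1 <+: (c :: v)) : pvScan (c :: v) = c :: pvScan v := by
  rw [pvScan]
  have h : pvTable.findSome? (fun p => if p.1.isPrefixOf (c :: v) then some p else none) = none := by
    rw [List.findSome?_eq_none_iff]
    intro p hp
    simp [List.isPrefixOf_iff_prefix, hnm p hp]
  rw [h]

-- scan equations: firing each table entry
theorem scan_fire_1 (t : List Char) : pvScan (" (Small)".toList ++ t) = " (Half)".toList ++ pvScan t := by
  have h : " (Small)".toList ++ t = ' '::'('::'S'::'m'::'a'::'l'::'l'::')'::t := by simp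
  rw [h, pvScan]; simp [pvTable, List.drop]
theorem scan_fire_2 (t : List Char) : pvScan (" (small)".toList ++ t) = " (Half)".toList ++ pvScan t := by
  have h : " (small)".toList ++ t = ' '::'('::'s'::'m'::'a'::'l'::'l'::')'::t := by simp
  rw [h, pvScan]; simp [pvTable, List.drop]
theorem scan_fire_3 (t : List Char) : pvScan (" (Large)".toList ++ t) = " (Full)".toList ++ pvScan t := by
  have h : " (Large)".toList ++ t = ' '::'('::'L'::'a'::'r'::'g'::'e'::')'::t := by simp
  rw [h, pvScan]; simp [pvTable, List.drop]
theorem scan_fire_4 (t : List Char) : pvScan (" (large)".toList ++ t) = " (Full)".toList ++ pvScan t := by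
  have h : " (large)".toList ++ t = ' '::'('::'l'::'a'::'r'::'g'::'e'::')'::t := by simp
  rw [h, pvScan]; simp [pvTable, List.drop]
theorem scan_fire_5 (t : List Char) : pvScan (" Small".toList ++ t) = " (Half)".toList ++ pvScan t := by
  have h : " Small".toList ++ t = ' '::'S'::'m'::'a'::'l'::'l'::t := by simp
  rw [h, pvScan]; simp [pvTable, List.drop]
theorem scan_fire_6 (t : List Char) : pvScan (" Large".toList ++ t) = " (Full)".toList ++ pvScan t := by
  have h : " Large".toList ++ t = ' '::'L'::'a'::'r'::'g'::'e'::t := by simp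
  rw [h, pvScan]; simp [pvTable, List.drop]

-- chain equations: the chain of six passes on a string that starts with a table pattern
theorem chain_fire_1 (t : List Char) : pvChain (" (Small)".toList ++ t) = " (Half)".toList ++ pvChain t := by
  simp only [pvChain, pvTable, List.foldl_cons, List.foldl_nil, pvStep]
  rw [rep1_fire _ _ (by decide),
      rep1_append_of_nomatch " (small)".toList _ " (Half)".toList (by decide),
      rep1_append_of_nomatch " (Large)".toList _ " (Half)".toList (by decide),
      rep1_append_of_nomatch " (large)".toList _ " (Half)".toList (by decide),
      rep1_append_of_nomatch " Small".toList _ " (Half)".toList (by decide),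
      rep1_append_of_nomatch " Large".toList _ " (Half)".toList (by decide)]
theorem chain_fire_2 (t : List Char) : pvChain (" (small)".toList ++ t) = " (Half)".toList ++ pvChain t := by
  simp only [pvChain, pvTable, List.foldl_cons, List.foldl_nil, pvStep]
  rw [rep1_append_of_nomatch " (Small)".toList _ " (small)".toList (by decide),
      rep1_fire _ _ (by decide),
      rep1_append_of_nomatch " (Large)".toList _ " (Half)".toList (by decide),
      rep1_append_of_nomatch " (large)".toList _ " (Half)".toList (by decide),
      rep1_append_of_nomatch " Small".toList _ " (Half)".toList (by decide),
      rep1_append_of_nomatch " Large".toList _ " (Half)".toList (by decide)]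
theorem chain_fire_3 (t : List Char) : pvChain (" (Large)".toList ++ t) = " (Full)".toList ++ pvChain t := by
  simp only [pvChain, pvTable, List.foldl_cons, List.foldl_nil, pvStep]
  rw [rep1_append_of_nomatch " (Small)".toList _ " (Large)".toList (by decide),
      rep1_append_of_nomatch " (small)".toList _ " (Large)".toList (by decide),
      rep1_fire _ _ (by decide),
      rep1_append_of_nomatch " (large)".toList _ " (Full)".toList (by decide),
      rep1_append_of_nomatch " Small".toList _ " (Full)".toList (by decide),
      rep1_append_of_nomatch " Large".toList _ " (Full)".toList (by decide)]
theorem chain_fire_4 (t : List Char) : pvChain (" (large)".toList ++ t) = " (Full)".toList ++ pvChain t := by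
  simp only [pvChain, pvTable, List.foldl_cons, List.foldl_nil, pvStep]
  rw [rep1_append_of_nomatch " (Small)".toList _ " (large)".toList (by decide),
      rep1_append_of_nomatch " (small)".toList _ " (large)".toList (by decide),
      rep1_append_of_nomatch " (Large)".toList _ " (large)".toList (by decide),
      rep1_fire _ _ (by decide),
      rep1_append_of_nomatch " Small".toList _ " (Full)".toList (by decide),
      rep1_append_of_nomatch " Large".toList _ " (Full)".toList (by decide)]
theorem chain_fire_5 (t : List Char) : pvChain (" Small".toList ++ t) = " (Half)".toList ++ pvChain t := by
  simp only [pvChain, pvTable, List.foldl_cons, List.foldl_nil, pvStep]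
  rw [rep1_append_of_nomatch " (Small)".toList _ " Small".toList (by decide),
      rep1_append_of_nomatch " (small)".toList _ " Small".toList (by decide),
      rep1_append_of_nomatch " (Large)".toList _ " Small".toList (by decide),
      rep1_append_of_nomatch " (large)".toList _ " Small".toList (by decide),
      rep1_fire _ _ (by decide),
      rep1_append_of_nomatch " Large".toList _ " (Half)".toList (by decide)]
theorem chain_fire_6 (t : List Char) : pvChain (" Large".toList ++ t) = " (Full)".toList ++ pvChain t := by
  simp only [pvChain, pvTable, List.foldl_cons, List.foldl_nil, pvStep]
  rw [rep1_append_of_nomatch " (Small)".toList _ " Large".toList (by decide),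
      rep1_append_of_nomatch " (small)".toList _ " Large".toList (by decide),
      rep1_append_of_nomatch " (Large)".toList _ " Large".toList (by decide),
      rep1_append_of_nomatch " (large)".toList _ " Large".toList (by decide),
      rep1_append_of_nomatch " Small".toList _ " Large".toList (by decide),
      rep1_fire _ _ (by decide)]

theorem chain_eq_scan : ∀ s : List Char, pvChain s = pvScan s := by
  have key : ∀ n (s : List Char), s.length ≤ n → pvChain s = pvScan s := by
    intro n
    induction n with
    | zero =>
      intro s hs
      match s, hs with
      | [], _ => simp [pvChain, pvTable, List.foldl, pvStep, rep1, pvScan]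
    | succ n ih =>
      intro s hs
      by_cases h1 : " (Small)".toList <+: s
      · obtain ⟨t, rfl⟩ := h1
        rw [chain_fire_1, scan_fire_1, ih t (by simp at hs ⊢; omega)]
      by_cases h2 : " (small)".toList <+: s
      · obtain ⟨t, rfl⟩ := h2
        rw [chain_fire_2, scan_fire_2, ih t (by simp at hs ⊢; omega)]
      by_cases h3 : " (Large)".toList <+: s
      · obtain ⟨t, rfl⟩ := h3
        rw [chain_fire_3, scan_fire_3, ih t (by simp at hs ⊢; omega)]
      by_cases h4 : " (large)".toList <+: s
      · obtain ⟨t, rfl⟩ := h4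
        rw [chain_fire_4, scan_fire_4, ih t (by simp at hs ⊢; omega)]
      by_cases h5 : " Small".toList <+: s
      · obtain ⟨t, rfl⟩ := h5
        rw [chain_fire_5, scan_fire_5, ih t (by simp at hs ⊢; omega)]
      by_cases h6 : " Large".toList <+: s
      · obtain ⟨t, rfl⟩ := h6
        rw [chain_fire_6, scan_fire_6, ih t (by simp at hs ⊢; omega)]
      match s with
      | [] => simp [pvChain, pvTable, List.foldl, pvStep, rep1, pvScan]
      | c :: t =>
        have hnm : ∀ pr ∈ pvTable, ¬ pr.1 <+: (c :: t) := by
          intro pr hpr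
          simp only [pvTable, List.mem_cons, List.not_mem_nil, or_false] at hpr
          rcases hpr with rfl | rfl | rfl | rfl | rfl | rfl <;> assumption
        rw [show pvChain (c :: t) = pvTable.foldl pvStep (c :: t) from rfl,
            chain_cons_nomatch pvTable c t pvTable_shape hnm,
            scan_cons_nomatch c t hnm]
        rw [show pvTable.foldl pvStep t = pvChain t from rfl, ih t (by simpa using hs)]
  exact fun s => key s.length s le_rfl

theorem a_toList (name : String) : (rename_portion_sizes name).toList = pvChain name.toList := by
  simp only [rename_portion_sizes, List.foldl_cons, List.foldl_nil,
    pvChain, pvTable, pvStep]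
  rw [PySem.Str.toList_replace, PySem.Str.toList_replace, PySem.Str.toList_replace,
      PySem.Str.toList_replace, PySem.Str.toList_replace, PySem.Str.toList_replace]
  rw [replace_eq_rep1 _ _ _ (by decide), replace_eq_rep1 _ _ _ (by decide),
      replace_eq_rep1 _ _ _ (by decide), replace_eq_rep1 _ _ _ (by decide),
      replace_eq_rep1 _ _ _ (by decide), replace_eq_rep1 _ _ _ (by decide)]

-- ===== VERDICT (by name: the statement is the Claim_ definition above) =====
theorem rename_portion_sizes_spec : Claim_equal_rename_portion_sizes := by
  intro name _
  show rename_portion_sizes name = rename_portion_sizes_alt name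
  refine String.toList_inj.mp ?_
  rw [a_toList, chain_eq_scan]
  simp [rename_portion_sizes_alt]
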